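-- pv_equiv track=rewrite | github.com/macrojames/adventofcode | 2023/01.py | sum2
-- ===== SOURCE A (Python) =====
-- numbers = {'zero': 0,
--     'one': 1, 'two': 2, 'three': 3,
--     'four': 4, 'five': 5, 'six': 6,
--     'seven': 7, 'eight': 8, 'nine': 9
-- }
--
-- digits = [str(s) for s in numbers.values()]
--
-- def sum2(inp) -> int :
--     sum2 = 0
--     for line in inp:
--         n = ''
--         for i, c in enumerate(line):
--             part = line[:i+1]
--             if c in digits:
--                 n += c
--                 break
--             elif any([k in part for k in numbers.keys()]):
--                 x = next(v[1] for v in numbers.items() if v[0] in part)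
--                 n += str(x)
--                 break
--         for i, c in enumerate(line[::-1]):
--             part = line[::-1][:i+1]
--             if c in digits:
--                 n += c
--                 break
--             elif any([k[::-1] in part for k in numbers.keys()]):
--                 x = next(v[1] for v in numbers.items() if v[0][::-1] in part)
--                 n += str(x)
--                 break
--
--         if len(n) == 2:
--             sum2 += int(n)
--     return sum2
-- ===== SOURCE B (Python) =====
-- WORDS = [('zero', 0), ('one', 1), ('two', 2), ('three', 3), ('four', 4),
--          ('five', 5), ('six', 6), ('seven', 7), ('eight', 8), ('nine', 9)]
--
-- # words grouped by the character at which an occurrence is detected during the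
-- # scan: the last character for the forward pass; for the backward pass (a scan
-- # over the reversed line) the reversed word, keyed by its last character in the
-- # reversed line, i.e. the word's first character
-- BY_LAST = {}
-- for _w, _v in WORDS:
--     BY_LAST.setdefault(_w[-1], []).append((_w, _v))
-- BY_LAST_R = {}
-- for _w, _v in WORDS:
--     BY_LAST_R.setdefault(_w[0], []).append((_w[::-1], _v))
--
--
-- def _scan(s, table):
--     # single pass: at position i only a digit, or a word ending exactly at i
--     # (hence with last character s[i]), can be the first token
--     for i, c in enumerate(s):
--         if c in '0123456789':
--             return int(c)
--         for w, v in table.get(c, ()):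
--             if s.endswith(w, 0, i + 1):
--                 return v
--     return None
--
--
-- def sum2(inp) -> int:
--     total = 0
--     for line in inp:
--         a = _scan(line, BY_LAST)
--         b = _scan(line[::-1], BY_LAST_R)
--         if a is not None and b is not None:
--             total += 10 * a + b
--     return total
-- ===== Notes on version B (the rewrite author's own statement) =====
-- stated objective: faster
-- what changed: Per line, A rescans the whole growing prefix for every spelled word at each position (and again on the reversed line); B makes a single pass per direction that only tests for a digit or a word ending exactly at the current position, removing the inner substring scans.
import Mathlib
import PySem

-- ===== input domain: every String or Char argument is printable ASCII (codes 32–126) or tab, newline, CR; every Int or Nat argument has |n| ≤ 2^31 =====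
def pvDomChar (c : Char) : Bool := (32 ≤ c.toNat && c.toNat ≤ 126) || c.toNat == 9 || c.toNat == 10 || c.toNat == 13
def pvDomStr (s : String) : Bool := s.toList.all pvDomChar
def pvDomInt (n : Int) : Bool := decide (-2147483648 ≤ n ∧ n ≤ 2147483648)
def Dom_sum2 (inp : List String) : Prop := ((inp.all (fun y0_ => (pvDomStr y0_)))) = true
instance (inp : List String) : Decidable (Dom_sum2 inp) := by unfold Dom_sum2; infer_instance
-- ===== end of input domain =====

set_option maxRecDepth 4000


-- B replaces A's per-line rescans of the whole growing prefix for every spelled word by a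
-- single pass per direction that tests only for a digit or a word (looked up by its last
-- character) ending exactly at the current position (objective: faster).

-- ===== PORT A =====
-- numbers = {'zero': 0, ..., 'nine': 9}  (dict → association list in insertion order)
def pvNumbers : List (List Char × Int) :=
  [("zero".toList, 0), ("one".toList, 1), ("two".toList, 2), ("three".toList, 3),
   ("four".toList, 4), ("five".toList, 5), ("six".toList, 6),
   ("seven".toList, 7), ("eight".toList, 8), ("nine".toList, 9)]

-- digits = [str(s) for s in numbers.values()] : a list of one-character strings
def pvDigits : List (List Char) := pvNumbers.map (fun kv => PySem.Int.toChars kv.2)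

-- One of A's two per-line loops ('for i, c in enumerate(...)' with break).  Both loops
-- are the same code up to the key transform κ applied to each word k (κ = id in the
-- first loop, κ = reverse for 'k[::-1]' in the second); the loop runs on s (= the line,
-- resp. the reversed line) and returns the appended piece of n (none = no break).
-- 'k in part' is PySem.Chars.isIn (exact substring test); 'any(...)' then
-- 'next(v for ... if pred)' is any + find? of the same predicate (next's StopIteration
-- is unreachable because any guarantees a match); str(x) is PySem.Int.toChars.
def pvScanA (κ : List Char → List Char) (s : List Char) (i : Nat) : Option (List Char) :=
  if h : i < s.length then
    let c := s[i]
    let part := s.take (i + 1)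
    if [c] ∈ pvDigits then some [c]
    else if pvNumbers.any (fun kv => PySem.Chars.isIn (κ kv.1) part) then
      match pvNumbers.find? (fun kv => PySem.Chars.isIn (κ kv.1) part) with
      | some kv => some (PySem.Int.toChars kv.2)
      | none => none    -- unreachable: any = true gives find? = some
    else pvScanA κ s (i + 1)
  else none
termination_by s.length - i

-- int(n) for the two-digit-character string n built by the loops (exact on digit
-- strings, the only strings reaching it).
def pvPyInt (n : List Char) : Int := n.foldl (fun a c => 10 * a + ((c.toNat : Int) - 48)) 0

def sum2 (inp : List String) : Int :=
  inp.foldl (fun acc line =>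
    let l := line.toList
    -- n = '' ; first loop may append one piece, second loop (on line[::-1], i.e.
    -- l.reverse, cf. PySem slice?_none_none_neg_one) may append another
    let n := ((pvScanA id l 0).getD []) ++ ((pvScanA List.reverse l.reverse 0).getD [])
    if n.length = 2 then acc + pvPyInt n else acc) 0

-- ===== PORT B =====
-- WORDS = [('zero', 0), ..., ('nine', 9)]
def pvWordsB : List (List Char × Int) :=
  [("zero".toList, 0), ("one".toList, 1), ("two".toList, 2), ("three".toList, 3),
   ("four".toList, 4), ("five".toList, 5), ("six".toList, 6),
   ("seven".toList, 7), ("eight".toList, 8), ("nine".toList, 9)]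

-- w[-1] and w[0]; every word in WORDS is nonempty, so pyGet? is always some and
-- the ' ' default is unreachable
def pvLastKey (w : List Char) : Char := (PySem.List.pyGet? w (-1)).getD ' '
def pvFirstKey (w : List Char) : Char := (PySem.List.pyGet? w 0).getD ' '

-- BY_LAST = {}; for w, v in WORDS: BY_LAST.setdefault(w[-1], []).append((w, v))
-- (setdefault-then-append = d[k] = d.get(k, []) + [(w, v)] = Dict.modify)
def pvByLast : PySem.Dict Char (List (List Char × Int)) :=
  pvWordsB.foldl (fun d kv => d.modify (pvLastKey kv.1) [] (· ++ [kv])) PySem.Dict.empty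

-- BY_LAST_R = {}; for w, v in WORDS: BY_LAST_R.setdefault(w[0], []).append((w[::-1], v))
def pvByLastR : PySem.Dict Char (List (List Char × Int)) :=
  pvWordsB.foldl (fun d kv => d.modify (pvFirstKey kv.1) [] (· ++ [(kv.1.reverse, kv.2)])) PySem.Dict.empty

-- _scan(s, table): single pass; at position i either a digit (int(c) ported as
-- c.toNat - 48, exact on the digit characters that reach it) or the first word of the
-- group table[c] that s[:i+1] ends with (s.endswith(w, 0, i+1) = endswith of the
-- take-(i+1) prefix, exact; table.get(c, ()) is getD with the empty group).
def pvScanB (table : PySem.Dict Char (List (List Char × Int))) (s : List Char) (i : Nat) : Option Int :=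
  if h : i < s.length then
    let c := s[i]
    if c ∈ "0123456789".toList then some ((c.toNat : Int) - 48)
    else match (table.getD c []).find? (fun kv => PySem.Chars.endswith (s.take (i + 1)) kv.1) with
      | some kv => some kv.2
      | none => pvScanB table s (i + 1)
  else none
termination_by s.length - i

def sum2_alt (inp : List String) : Int :=
  inp.foldl (fun total line =>
    let l := line.toList
    let a := pvScanB pvByLast l 0
    let b := pvScanB pvByLastR l.reverse 0
    match a, b with
    | some x, some y => total + (10 * x + y)
    | _, _ => total) 0

-- ===== PRECONDITION & SPEC =====
def Spec_sum2 (inp : List String) (out : Int) : Prop := out = sum2_alt inp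
instance (inp : List String) (out : Int) : Decidable (Spec_sum2 inp out) := by unfold Spec_sum2; infer_instance

-- ===== CLAIM (what is proved, stated in full; the proofs are below) =====
def Claim_equal_sum2 : Prop := ∀ (inp : List String), Dom_sum2 inp → Spec_sum2 inp (sum2 inp)

-- ===== LEMMAS AND PROOFS =====

-- concrete forms of the two digit tests
theorem pv_digitChars_eq : "0123456789".toList = ['0','1','2','3','4','5','6','7','8','9'] := by decide

theorem pv_digits_eq :
    pvDigits = [['0'],['1'],['2'],['3'],['4'],['5'],['6'],['7'],['8'],['9']] := by decide

-- find? is determined by the predicate's values on the members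
theorem pv_find?_congr {α : Type} (l : List α) (p q : α → Bool)
    (h : ∀ x ∈ l, p x = q x) : l.find? p = l.find? q := by
  induction l with
  | nil => rfl
  | cons a t ih =>
      simp only [List.find?_cons, h a (List.mem_cons_self)]
      cases q a <;> simp [ih (fun x hx => h x (List.mem_cons_of_mem a hx))]

-- entries whose predicate can never hold may be filtered away before find?
theorem pv_find?_filter {α : Type} (l : List α) (P Q : α → Bool)
    (h : ∀ x ∈ l, P x = true → Q x = true) : (l.filter Q).find? P = l.find? P := by
  induction l with
  | nil => rfl
  | cons a t ih =>
      have ih' := ih (fun x hx => h x (List.mem_cons_of_mem a hx))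
      by_cases hQ : Q a = true
      · rw [List.filter_cons_of_pos hQ]
        simp only [List.find?_cons]
        cases P a <;> simp [ih']
      · have hP : P a = false := by
          cases hPa : P a
          · rfl
          · exact absurd (h a List.mem_cons_self hPa) hQ
        rw [List.filter_cons_of_neg (by simpa using hQ)]
        simp only [List.find?_cons, hP]
        exact ih'

-- a word not in the prefix is in prefix++[c] iff it is a suffix of prefix++[c]
theorem pv_infix_concat_iff_suffix {w p : List Char} {c : Char} (h : ¬ w <:+: p) :
    (w <:+: p ++ [c]) ↔ (w <:+ p ++ [c]) := by
  rw [List.infix_concat_iff]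
  exact ⟨fun hh => hh.resolve_right h, Or.inl⟩

-- [c] is one of A's digit strings iff c is one of B's digit characters
theorem pv_digit_mem (c : Char) : ([c] ∈ pvDigits) ↔ (c ∈ "0123456789".toList) := by
  rw [pv_digits_eq, pv_digitChars_eq]
  simp

-- for a digit character, A's appended string equals str(int(c))
theorem pv_digit_val : ∀ c ∈ "0123456789".toList,
    ([c] : List Char) = PySem.Int.toChars ((c.toNat : Int) - 48) := by
  rw [pv_digitChars_eq]; intro c hc; fin_cases hc <;> decide

theorem pv_digit_range : ∀ c ∈ "0123456789".toList,
    0 ≤ (c.toNat : Int) - 48 ∧ (c.toNat : Int) - 48 ≤ 9 := by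
  rw [pv_digitChars_eq]; intro c hc; fin_cases hc <;> decide

-- every key of pvNumbers is nonempty, also after the transform
theorem pv_keys_ne_nil (κ : List Char → List Char) (hκ : κ = id ∨ κ = List.reverse) :
    ∀ kv ∈ pvNumbers, κ kv.1 ≠ [] := by
  rcases hκ with rfl | rfl <;> decide

theorem pv_mapped_ne_nil (κ : List Char → List Char) (hκ : κ = id ∨ κ = List.reverse) :
    ∀ kv ∈ pvNumbers.map (fun kv => (κ kv.1, kv.2)), kv.1 ≠ [] := by
  rcases hκ with rfl | rfl <;> decide

-- w[-1] of a nonempty w is its last element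
theorem pv_pyGet_neg_one (w : List Char) (h : w ≠ []) :
    PySem.List.pyGet? w (-1) = w.getLast? := by
  cases w with
  | nil => exact absurd rfl h
  | cons a t =>
      simp [PySem.List.pyGet?, PySem.List.pyIdx?, List.getLast?_eq_getElem?]

-- a nonempty suffix ends with the last character of the whole list
theorem pv_suffix_getLast {w p : List Char} (hsuf : w <:+ p) (hne : w ≠ []) :
    w.getLast? = p.getLast? := by
  obtain ⟨t, rfl⟩ := hsuf
  rw [List.getLast?_append]
  cases hw : w.getLast? with
  | none => exact absurd (List.getLast?_eq_none_iff.mp hw) hne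
  | some a => rfl

-- the grouped tables look up exactly the words with the given last character
theorem pv_getD_byLast (c : Char) :
    pvByLast.getD c [] = pvWordsB.filter (fun kv => pvLastKey kv.1 == c) := by
  have hfm := List.foldl_map (f := fun kv : List Char × Int => (pvLastKey kv.1, kv))
    (g := fun (d : PySem.Dict Char (List (List Char × Int))) (p : Char × (List Char × Int)) =>
      d.modify p.1 [] (· ++ [p.2]))
    (l := pvWordsB) (init := PySem.Dict.empty)
  have h1 : pvByLast
      = (pvWordsB.map (fun kv => (pvLastKey kv.1, kv))).foldl
          (fun d p => d.modify p.1 [] (· ++ [p.2])) PySem.Dict.empty := hfm.symm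
  rw [h1, PySem.Dict.getD_foldl_modify_append, PySem.Dict.getD_empty,
    List.filter_map, List.map_map]
  show (pvWordsB.filter (fun kv => pvLastKey kv.1 == c)).map (fun kv => kv)
      = pvWordsB.filter (fun kv => pvLastKey kv.1 == c)
  simp

theorem pv_getD_byLastR (c : Char) :
    pvByLastR.getD c []
      = (pvWordsB.map (fun kv => (kv.1.reverse, kv.2))).filter (fun kv => pvLastKey kv.1 == c) := by
  have hfm := List.foldl_map (f := fun kv : List Char × Int => (pvFirstKey kv.1, (kv.1.reverse, kv.2)))
    (g := fun (d : PySem.Dict Char (List (List Char × Int))) (p : Char × (List Char × Int)) =>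
      d.modify p.1 [] (· ++ [p.2]))
    (l := pvWordsB) (init := PySem.Dict.empty)
  have h1 : pvByLastR
      = (pvWordsB.map (fun kv => (pvFirstKey kv.1, (kv.1.reverse, kv.2)))).foldl
          (fun d p => d.modify p.1 [] (· ++ [p.2])) PySem.Dict.empty := hfm.symm
  rw [h1, PySem.Dict.getD_foldl_modify_append, PySem.Dict.getD_empty,
    List.filter_map, List.filter_map, List.map_map]
  show (pvWordsB.filter (fun kv => pvFirstKey kv.1 == c)).map (fun kv => (kv.1.reverse, kv.2))
      = (pvWordsB.filter (fun kv => pvLastKey kv.1.reverse == c)).map (fun kv => (kv.1.reverse, kv.2))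
  apply congrArg
  apply List.filter_congr
  intro kv hkv
  fin_cases hkv <;> rfl

-- the two tables of B correspond to the two key transforms of A
theorem pv_words_id : pvNumbers.map (fun kv => (id kv.1, kv.2)) = pvWordsB := by decide
theorem pv_words_rev :
    pvNumbers.map (fun kv => (List.reverse kv.1, kv.2))
      = pvWordsB.map (fun kv => (kv.1.reverse, kv.2)) := by decide

theorem pv_table_getD (κ : List Char → List Char) (hκ : κ = id ∨ κ = List.reverse)
    (table : PySem.Dict Char (List (List Char × Int)))
    (htab : (κ = id ∧ table = pvByLast) ∨ (κ = List.reverse ∧ table = pvByLastR))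
    (c : Char) :
    table.getD c []
      = (pvNumbers.map (fun kv => (κ kv.1, kv.2))).filter (fun kv => pvLastKey kv.1 == c) := by
  rcases htab with ⟨rfl, rfl⟩ | ⟨rfl, rfl⟩
  · rw [pv_words_id]; exact pv_getD_byLast c
  · rw [pv_words_rev]; exact pv_getD_byLastR c

-- the core scan equivalence: under the invariant that no (transformed) word occurs in
-- the first i characters, A's prefix-rescanning loop equals B's grouped ending-check loop
theorem pv_scan_eq (κ : List Char → List Char) (hκ : κ = id ∨ κ = List.reverse)
    (table : PySem.Dict Char (List (List Char × Int)))
    (htab : (κ = id ∧ table = pvByLast) ∨ (κ = List.reverse ∧ table = pvByLastR))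
    (s : List Char) (i : Nat)
    (inv : ∀ kv ∈ pvNumbers, ¬ (κ kv.1) <:+: s.take i) :
    pvScanA κ s i = (pvScanB table s i).map PySem.Int.toChars := by
  rw [pvScanA, pvScanB]
  by_cases h : i < s.length
  · simp only [h, dite_true]
    have hpart : s.take (i + 1) = s.take i ++ [s[i]] := List.take_succ_eq_append_getElem h
    by_cases hd : [s[i]] ∈ pvDigits
    · have hd' : s[i] ∈ "0123456789".toList := (pv_digit_mem _).mp hd
      simp only [hd, if_true, hd', if_true, Option.map_some, Option.some.injEq]
      exact pv_digit_val s[i] hd'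
    · have hd' : s[i] ∉ "0123456789".toList := fun hc => hd ((pv_digit_mem _).mpr hc)
      simp only [hd, if_false, hd', if_false]
      -- B's grouped lookup finds the same word as a scan of the whole table ...
      have hlast : (s.take (i + 1)).getLast? = some s[i] := by
        rw [hpart]; exact List.getLast?_concat
      have himp : ∀ kv ∈ pvNumbers.map (fun kv => (κ kv.1, kv.2)),
          (PySem.Chars.endswith (s.take (i + 1)) kv.1) = true → (pvLastKey kv.1 == s[i]) = true := by
        intro kv hkv hE
        have hne : kv.1 ≠ [] := pv_mapped_ne_nil κ hκ kv hkv
        have hsuf := (PySem.Chars.endswith_iff _ _).mp hE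
        have hL : kv.1.getLast? = some s[i] := (pv_suffix_getLast hsuf hne).trans hlast
        unfold pvLastKey
        rw [pv_pyGet_neg_one kv.1 hne, hL]
        simp
      have hgroup : (table.getD s[i] []).find?
            (fun kv => PySem.Chars.endswith (s.take (i + 1)) kv.1)
          = (pvNumbers.map (fun kv => (κ kv.1, kv.2))).find?
            (fun kv => PySem.Chars.endswith (s.take (i + 1)) kv.1) := by
        rw [pv_table_getD κ hκ table htab s[i]]
        exact pv_find?_filter _ _ _ himp
      -- ... and that scan agrees with A's substring test under the invariant
      have hpred : ∀ kv ∈ pvNumbers,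
          (PySem.Chars.isIn (κ kv.1) (s.take (i + 1)))
            = (PySem.Chars.endswith (s.take (i + 1)) (κ kv.1)) := by
        intro kv hkv
        have hni : ¬ (κ kv.1) <:+: s.take i := inv kv hkv
        by_cases hin : (κ kv.1) <:+: s.take (i + 1)
        · have hsuf : (κ kv.1) <:+ s.take (i + 1) := by
            rw [hpart] at hin ⊢
            exact (pv_infix_concat_iff_suffix hni).mp hin
          rw [(PySem.Chars.isIn_iff_infix _ _).mpr hin, (PySem.Chars.endswith_iff _ _).mpr hsuf]
        · have hns : ¬ (κ kv.1) <:+ s.take (i + 1) := fun hc => hin hc.isInfix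
          rw [(PySem.Chars.isIn_eq_false_iff _ _).mpr hin]
          cases hE : PySem.Chars.endswith (s.take (i + 1)) (κ kv.1)
          · rfl
          · exact absurd ((PySem.Chars.endswith_iff _ _).mp hE) hns
      have hfind : pvNumbers.find? (fun kv => PySem.Chars.isIn (κ kv.1) (s.take (i + 1)))
          = pvNumbers.find? (fun kv => PySem.Chars.endswith (s.take (i + 1)) (κ kv.1)) :=
        pv_find?_congr _ _ _ (fun kv hkv => hpred kv hkv)
      rw [hgroup, List.find?_map]
      have hcomp : ((fun kv : List Char × Int => PySem.Chars.endswith (s.take (i + 1)) kv.1)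
            ∘ (fun kv : List Char × Int => (κ kv.1, kv.2)))
          = (fun kv : List Char × Int => PySem.Chars.endswith (s.take (i + 1)) (κ kv.1)) := rfl
      rw [hcomp]
      cases hF : pvNumbers.find? (fun kv => PySem.Chars.endswith (s.take (i + 1)) (κ kv.1)) with
      | some kv =>
          have hmem := List.mem_of_find?_eq_some hF
          have hp := List.find?_some hF
          have hany : pvNumbers.any (fun kv => PySem.Chars.isIn (κ kv.1) (s.take (i + 1))) = true := by
            rw [List.any_eq_true]
            refine ⟨kv, hmem, ?_⟩
            show PySem.Chars.isIn (κ kv.1) (s.take (i + 1)) = true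
            rw [hpred kv hmem]
            exact hp
          rw [hany, hfind, hF]
          rfl
      | none =>
          have hnone := List.find?_eq_none.mp hF
          have hany : pvNumbers.any (fun kv => PySem.Chars.isIn (κ kv.1) (s.take (i + 1))) = false := by
            rw [List.any_eq_false]
            intro kv hkv
            show ¬ PySem.Chars.isIn (κ kv.1) (s.take (i + 1)) = true
            rw [hpred kv hkv]
            exact hnone kv hkv
          rw [hany]
          simp only [Bool.false_eq_true, if_false, Option.map_none]
          -- recurse: the invariant extends to the next prefix
          apply pv_scan_eq κ hκ table htab s (i + 1)
          intro kv hkv hc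
          exact hnone kv hkv ((PySem.Chars.endswith_iff _ _).mpr (by
            rw [hpart]
            exact (pv_infix_concat_iff_suffix (inv kv hkv)).mp (hpart ▸ hc)))
  · simp [h]
termination_by s.length - i

-- values stored in either table lie in 0..9
theorem pv_table_range (κ : List Char → List Char) (hκ : κ = id ∨ κ = List.reverse)
    (table : PySem.Dict Char (List (List Char × Int)))
    (htab : (κ = id ∧ table = pvByLast) ∨ (κ = List.reverse ∧ table = pvByLastR)) :
    ∀ c, ∀ kv ∈ table.getD c [], 0 ≤ kv.2 ∧ kv.2 ≤ 9 := by
  intro c kv hkv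
  rw [pv_table_getD κ hκ table htab c] at hkv
  obtain ⟨kv0, hkv0, rfl⟩ := List.mem_map.mp (List.mem_of_mem_filter hkv)
  show 0 ≤ kv0.2 ∧ kv0.2 ≤ 9
  have hrange : ∀ kv ∈ pvNumbers, 0 ≤ kv.2 ∧ kv.2 ≤ 9 := by decide
  exact hrange kv0 hkv0

-- range of B's scan results
theorem pv_scanB_range (table : PySem.Dict Char (List (List Char × Int)))
    (hw : ∀ c, ∀ kv ∈ table.getD c [], 0 ≤ kv.2 ∧ kv.2 ≤ 9)
    (s : List Char) (i : Nat) (v : Int) (h : pvScanB table s i = some v) : 0 ≤ v ∧ v ≤ 9 := by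
  rw [pvScanB] at h
  by_cases hl : i < s.length
  · simp only [hl, dite_true] at h
    by_cases hd : s[i] ∈ "0123456789".toList
    · simp only [hd, if_true, Option.some.injEq] at h
      subst h
      exact pv_digit_range s[i] hd
    · simp only [hd, if_false] at h
      cases hF : (table.getD s[i] []).find? (fun kv => PySem.Chars.endswith (s.take (i + 1)) kv.1) with
      | some kv =>
          rw [hF] at h
          simp only [Option.some.injEq] at h
          subst h
          exact hw s[i] kv (List.mem_of_find?_eq_some hF)
      | none =>
          rw [hF] at h
          exact pv_scanB_range table hw s (i + 1) v h
  · simp [hl] at h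
termination_by s.length - i

-- int() of the concatenation of two one-digit strings, and their lengths
theorem pv_pyInt_pair (x y : Int) (hx0 : 0 ≤ x) (hx9 : x ≤ 9) (hy0 : 0 ≤ y) (hy9 : y ≤ 9) :
    pvPyInt (PySem.Int.toChars x ++ PySem.Int.toChars y) = 10 * x + y ∧
      (PySem.Int.toChars x ++ PySem.Int.toChars y).length = 2 := by
  interval_cases x <;> interval_cases y <;> exact ⟨by decide, by decide⟩

theorem pv_toChars_len_one (x : Int) (hx0 : 0 ≤ x) (hx9 : x ≤ 9) :
    (PySem.Int.toChars x).length = 1 := by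
  interval_cases x <;> decide

-- per-line equality of the two fold steps
theorem pv_line_eq (acc : Int) (line : String) :
    (let l := line.toList
     let n := ((pvScanA id l 0).getD []) ++ ((pvScanA List.reverse l.reverse 0).getD [])
     if n.length = 2 then acc + pvPyInt n else acc)
    = (let l := line.toList
       match pvScanB pvByLast l 0, pvScanB pvByLastR l.reverse 0 with
       | some x, some y => acc + (10 * x + y)
       | _, _ => acc) := by
  have hf : pvScanA id line.toList 0
      = (pvScanB pvByLast line.toList 0).map PySem.Int.toChars :=
    pv_scan_eq id (Or.inl rfl) pvByLast (Or.inl ⟨rfl, rfl⟩) _ 0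
      (fun kv hkv h => (pv_keys_ne_nil id (Or.inl rfl) kv hkv) (by simpa using h))
  have hb : pvScanA List.reverse line.toList.reverse 0
      = (pvScanB pvByLastR line.toList.reverse 0).map PySem.Int.toChars :=
    pv_scan_eq List.reverse (Or.inr rfl) pvByLastR (Or.inr ⟨rfl, rfl⟩) _ 0
      (fun kv hkv h => (pv_keys_ne_nil List.reverse (Or.inr rfl) kv hkv) (by simpa using h))
  have hwF := pv_table_range id (Or.inl rfl) pvByLast (Or.inl ⟨rfl, rfl⟩)
  have hwB := pv_table_range List.reverse (Or.inr rfl) pvByLastR (Or.inr ⟨rfl, rfl⟩)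
  simp only [hf, hb]
  cases hA : pvScanB pvByLast line.toList 0 with
  | none =>
      cases hB : pvScanB pvByLastR line.toList.reverse 0 with
      | none => simp
      | some y =>
          obtain ⟨hy0, hy9⟩ := pv_scanB_range _ hwB _ _ _ hB
          simp [pv_toChars_len_one y hy0 hy9]
  | some x =>
      obtain ⟨hx0, hx9⟩ := pv_scanB_range _ hwF _ _ _ hA
      cases hB : pvScanB pvByLastR line.toList.reverse 0 with
      | none => simp [pv_toChars_len_one x hx0 hx9]
      | some y =>
          obtain ⟨hy0, hy9⟩ := pv_scanB_range _ hwB _ _ _ hB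
          obtain ⟨hval, hlen⟩ := pv_pyInt_pair x y hx0 hx9 hy0 hy9
          simp [hlen, hval]

theorem pv_fold_eq (inp : List String) (acc : Int) :
    inp.foldl (fun acc line =>
      let l := line.toList
      let n := ((pvScanA id l 0).getD []) ++ ((pvScanA List.reverse l.reverse 0).getD [])
      if n.length = 2 then acc + pvPyInt n else acc) acc
    = inp.foldl (fun total line =>
      let l := line.toList
      match pvScanB pvByLast l 0, pvScanB pvByLastR l.reverse 0 with
      | some x, some y => total + (10 * x + y)
      | _, _ => total) acc := by
  induction inp generalizing acc with
  | nil => rfl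
  | cons line rest ih =>
      simp only [List.foldl_cons]
      rw [pv_line_eq acc line]
      exact ih _

-- ===== VERDICT (by name: the statement is the Claim_ definition above) =====
theorem sum2_spec : Claim_equal_sum2 := by
  intro inp _
  unfold Spec_sum2 sum2 sum2_alt
  exact pv_fold_eq inp 0
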